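-- pv_equiv track=rewrite | github.com/Green-JEONG/cote | programmers/알고리즘_고득점_kit/탐욕법(greedy)/1.py | solution
-- ===== SOURCE A (Python) =====
-- def solution(n, lost, reserve):
--     # 잃어버렸지만 여벌 없는 학생만 남김
--     lost_set = set(lost) - set(reserve)
--     # 여벌 있지만 안 잃어버린 학생만 남김
--     reserve_set = set(reserve) - set(lost)
--
--     # 빌려줄 수 있는 경우 확인
--     for r in sorted(reserve_set): # 번호 작은 학생부터 차례대로 빌려주기
--         if r - 1 in lost_set: # 앞번호 학생이 잃어버렸으면 빌려주고
--             lost_set.remove(r - 1) # 명단에서 제거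
--         elif r + 1 in lost_set: # 뒷번호 학생도 동일
--             lost_set.remove(r + 1)
--
--     return n - len(lost_set)
-- ===== SOURCE B (Python) =====
-- def solution(n, lost, reserve):
--     # two-pointer sweep over the two sorted (deduped, disjoint) lists
--     L = sorted(set(lost) - set(reserve))   # lost without a spare
--     R = sorted(set(reserve) - set(lost))   # spares not lost
--     i = j = matched = 0
--     while i < len(L) and j < len(R):
--         if R[j] < L[i] - 1:
--             j += 1
--         elif R[j] > L[i] + 1:
--             i += 1
--         else:
--             matched += 1
--             i += 1
--             j += 1
--     return n - (len(L) - matched)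
-- ===== Notes on version B (the rewrite author's own statement) =====
-- stated objective: alternative
-- what changed: Replaces the greedy that mutates a lost-set while iterating over the sorted reserve set by a two-pointer merge sweep over the two sorted disjoint lists that only counts matches.
import Mathlib
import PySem

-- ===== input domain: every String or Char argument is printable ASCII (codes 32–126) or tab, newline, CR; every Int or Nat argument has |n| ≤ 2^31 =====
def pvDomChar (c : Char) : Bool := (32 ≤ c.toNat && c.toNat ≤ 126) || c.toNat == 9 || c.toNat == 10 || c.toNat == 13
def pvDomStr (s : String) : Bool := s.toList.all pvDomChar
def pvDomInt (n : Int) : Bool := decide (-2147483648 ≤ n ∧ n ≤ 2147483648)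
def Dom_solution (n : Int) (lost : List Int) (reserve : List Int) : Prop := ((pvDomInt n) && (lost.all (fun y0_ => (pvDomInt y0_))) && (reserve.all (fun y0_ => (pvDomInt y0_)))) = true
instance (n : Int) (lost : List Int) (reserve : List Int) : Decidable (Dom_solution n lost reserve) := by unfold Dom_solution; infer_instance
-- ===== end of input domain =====

-- B replaces A's greedy (mutating a lost-set while iterating the sorted reserve set) by a
-- two-pointer merge sweep over the two sorted disjoint lists; same return value.


-- ===== PORT A =====
-- one step of A's loop body; lost_set.remove(x) runs only when x ∈ lost_set,
-- where Python's set.remove coincides with discard (exact there)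
def solStep (s : PySem.Set Int) (r : Int) : PySem.Set Int :=
  if PySem.Set.contains s (r - 1) then PySem.Set.discard s (r - 1)
  else if PySem.Set.contains s (r + 1) then PySem.Set.discard s (r + 1)
  else s

def solution (n : Int) (lost : List Int) (reserve : List Int) : Int :=
  let lostSet : PySem.Set Int := PySem.Set.diff (PySem.Set.ofList lost) (PySem.Set.ofList reserve)
  let reserveSet : PySem.Set Int := PySem.Set.diff (PySem.Set.ofList reserve) (PySem.Set.ofList lost)
  let final := (PySem.List.sorted reserveSet (fun x => x) false).foldl solStep lostSet
  n - PySem.Set.len final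

-- ===== PORT B =====
-- the while loop of Source B: two pointers over the sorted lists, counting matches
def matchCount : List Int → List Int → Int
  | _, [] => 0
  | [], _ :: _ => 0
  | l :: ls, r :: rs =>
    if r < l - 1 then matchCount (l :: ls) rs
    else if r > l + 1 then matchCount ls (r :: rs)
    else 1 + matchCount ls rs
termination_by L R => L.length + R.length

def solution_alt (n : Int) (lost : List Int) (reserve : List Int) : Int :=
  let L := PySem.List.sorted (PySem.Set.diff (PySem.Set.ofList lost) (PySem.Set.ofList reserve)) (fun x => x) false
  let R := PySem.List.sorted (PySem.Set.diff (PySem.Set.ofList reserve) (PySem.Set.ofList lost)) (fun x => x) false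
  n - ((L.length : Int) - matchCount L R)

-- ===== PRECONDITION & SPEC =====
def Spec_solution (n : Int) (lost : List Int) (reserve : List Int) (out : Int) : Prop := out = solution_alt n lost reserve
instance (n : Int) (lost : List Int) (reserve : List Int) (out : Int) : Decidable (Spec_solution n lost reserve out) := by unfold Spec_solution; infer_instance

-- ===== CLAIM (what is proved, stated in full; the proofs are below) =====
def Claim_equal_solution : Prop := ∀ (n : Int) (lost : List Int) (reserve : List Int), Dom_solution n lost reserve → Spec_solution n lost reserve (solution n lost reserve)

-- ===== LEMMAS AND PROOFS =====

lemma solStep_of_not_mem {L : List Int} {r : Int} (h1 : (r-1) ∉ L) (h2 : (r+1) ∉ L) :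
    solStep L r = L := by
  simp [solStep, PySem.Set.contains, h1, h2]

lemma solStep_cons_gt {l : Int} {ls : List Int} {r : Int} (h : l + 1 < r) :
    solStep (l :: ls) r = l :: solStep ls r := by
  have h1 : ((r - 1 : Int) == l) = false := by simp; omega
  have h2 : ((r + 1 : Int) == l) = false := by simp; omega
  have h1' : (!((l : Int) == r - 1)) = true := by simp; omega
  have h2' : (!((l : Int) == r + 1)) = true := by simp; omega
  have c1 : PySem.Set.contains (l :: ls) (r-1) = PySem.Set.contains ls (r-1) := by
    simp [PySem.Set.contains]; omega
  have c2 : PySem.Set.contains (l :: ls) (r+1) = PySem.Set.contains ls (r+1) := by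
    simp [PySem.Set.contains]; omega
  have d1 : PySem.Set.discard (l :: ls) (r-1) = l :: PySem.Set.discard ls (r-1) := by
    simp [PySem.Set.discard, h1']

  have d2 : PySem.Set.discard (l :: ls) (r+1) = l :: PySem.Set.discard ls (r+1) := by
    simp [PySem.Set.discard, h2']
  simp only [solStep, c1, c2, d1, d2]
  split_ifs <;> rfl

lemma fold_skip {l : Int} (R : List Int) : ∀ ls, (∀ r' ∈ R, l + 1 < r') →
    R.foldl solStep (l :: ls) = l :: R.foldl solStep ls := by
  induction R with
  | nil => intro ls _; rfl
  | cons r rs ih =>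
    intro ls h
    simp only [List.foldl_cons]
    rw [solStep_cons_gt (h r (List.mem_cons_self ..))]
    exact ih _ (fun r' hr' => h r' (List.mem_cons_of_mem _ hr'))

lemma solStep_match_hi {l : Int} {ls : List Int} (hls : ∀ x ∈ ls, l < x) :
    solStep (l :: ls) (l + 1) = ls := by
  have : (l + 1 - 1 : Int) = l := by ring
  simp [solStep, PySem.Set.contains, PySem.Set.discard, this]
  intro x hx; have := hls x hx; omega

lemma solStep_match_lo {l : Int} {ls : List Int} (hls : ∀ x ∈ ls, l < x) :
    solStep (l :: ls) (l - 1) = ls := by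
  have h2 : (l - 1 + 1 : Int) = l := by ring
  have h1 : (l - 1 - 1 : Int) ∉ (l :: ls) := by
    simp; constructor; · omega
    · intro hx; have := hls _ hx; omega
  simp [solStep, PySem.Set.contains, PySem.Set.discard, h1, h2]
  intro x hx; have := hls x hx; omega

lemma matchCount_nil_left (R : List Int) : matchCount [] R = 0 := by
  cases R <;> simp [matchCount]

lemma key : ∀ (m : Nat) (L R : List Int), L.length + R.length ≤ m →
    L.Pairwise (· < ·) → R.Pairwise (· < ·) → (∀ x ∈ L, x ∉ R) →
    ((R.foldl solStep L).length : Int) = (L.length : Int) - matchCount L R := by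
  intro m
  induction m with
  | zero =>
    intro L R hm _ _ _
    have : L = [] ∧ R = [] := by
      constructor <;> (apply List.eq_nil_of_length_eq_zero; omega)
    obtain ⟨hL0, hR0⟩ := this
    subst hL0; subst hR0
    simp [matchCount]
  | succ m ih =>
    intro L R hm hL hR hd
    match L, R with
    | L, [] => simp [matchCount.eq_def]
    | [], r :: rs =>
      have hs : solStep [] r = [] := by simp [solStep, PySem.Set.contains]
      simp only [List.foldl_cons, hs]
      have := ih [] rs (by simp at hm ⊢; omega) (by simp) (hR.sublist (List.sublist_cons_self ..)) (by simp)
      rw [matchCount]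
      rw [matchCount_nil_left] at this
      simpa using this
    | l :: ls, r :: rs =>
      have hls : ∀ x ∈ ls, l < x := by
        intro x hx; exact (List.pairwise_cons.mp hL).1 x hx
      have hrs : ∀ x ∈ rs, r < x := by
        intro x hx; exact (List.pairwise_cons.mp hR).1 x hx
      have hL' : ls.Pairwise (· < ·) := (List.pairwise_cons.mp hL).2
      have hR' : rs.Pairwise (· < ·) := (List.pairwise_cons.mp hR).2
      have hlr : l ≠ r := by
        intro h; exact hd l (List.mem_cons_self ..) (h ▸ List.mem_cons_self ..)
      by_cases h1 : r < l - 1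
      · -- r too small: step is a no-op
        have e : solStep (l :: ls) r = l :: ls := by
          apply solStep_of_not_mem <;>
          · simp only [List.mem_cons]
            push Not
            constructor
            · omega
            · intro hx; have := hls _ hx; omega
        simp only [List.foldl_cons, e]
        have := ih (l :: ls) rs (by simp at hm ⊢; omega) hL hR'
          (fun x hx hr => hd x hx (List.mem_cons_of_mem _ hr))
        rw [matchCount]
        simp only [if_pos h1]
        exact this
      · by_cases h2 : l + 1 < r
        · -- l untouched by the whole fold
          have hall : ∀ r' ∈ r :: rs, l + 1 < r' := by
            intro r' hr'
            rcases List.mem_cons.mp hr' with h | h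
            · omega
            · have := hrs _ h; omega
          rw [fold_skip _ _ hall]
          have := ih ls (r :: rs) (by simp at hm ⊢; omega) hL' hR
            (fun x hx => hd x (List.mem_cons_of_mem _ hx))
          rw [matchCount]
          simp only [if_neg h1, if_pos (by omega : r > l + 1)]
          simp at this ⊢
          omega
        · -- match: r = l - 1 or r = l + 1
          have e : solStep (l :: ls) r = ls := by
            rcases (by omega : r = l - 1 ∨ r = l + 1) with h | h
            · subst h; exact solStep_match_lo hls
            · subst h; exact solStep_match_hi hls
          simp only [List.foldl_cons, e]
          have := ih ls rs (by simp at hm ⊢; omega) hL' hR'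
            (fun x hx => fun hr => hd x (List.mem_cons_of_mem _ hx) (List.mem_cons_of_mem _ hr))
          rw [matchCount]
          simp only [if_neg h1, if_neg (by omega : ¬ r > l + 1)]
          simp at this ⊢
          omega

lemma solStep_perm {s s' : PySem.Set Int} (h : s.Perm s') (r : Int) :
    (solStep s r).Perm (solStep s' r) := by
  have hc : ∀ x : Int, PySem.Set.contains s x = PySem.Set.contains s' x := by
    intro x
    simp only [PySem.Set.contains]
    rw [Bool.eq_iff_iff]
    simp only [List.contains_iff_mem]
    exact ⟨fun hx => h.mem_iff.mp hx, fun hx => h.mem_iff.mpr hx⟩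
  simp only [solStep, hc, PySem.Set.discard]
  split_ifs <;> [exact h.filter _; exact h.filter _; exact h]

lemma foldl_solStep_perm {s s' : PySem.Set Int} (h : s.Perm s') (R : List Int) :
    (R.foldl solStep s).Perm (R.foldl solStep s') := by
  induction R generalizing s s' with
  | nil => exact h
  | cons r rs ih => exact ih (solStep_perm h r)

lemma sorted_diff_pairwise_lt (xs ys : List Int) :
    (PySem.List.sorted (PySem.Set.diff (PySem.Set.ofList xs) (PySem.Set.ofList ys)) (fun x => x) false).Pairwise (· < ·) := by
  have hnd : (PySem.Set.diff (PySem.Set.ofList xs) (PySem.Set.ofList ys)).Nodup :=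
    (PySem.Set.nodup_ofList xs).filter _
  have hperm := PySem.List.sorted_perm (PySem.Set.diff (PySem.Set.ofList xs) (PySem.Set.ofList ys)) (fun x => x) false
  have hnd' := hperm.nodup_iff.mpr hnd
  have hle := PySem.List.sorted_pairwise (xs := PySem.Set.diff (PySem.Set.ofList xs) (PySem.Set.ofList ys)) (key := fun x => x)
  exact (hle.and hnd').imp (fun h => lt_of_le_of_ne h.1 h.2)

theorem main_eq (n : Int) (lost : List Int) (reserve : List Int) :
    solution n lost reserve = solution_alt n lost reserve := by
  unfold solution solution_alt
  simp only [PySem.Set.len]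
  set S0 := PySem.Set.diff (PySem.Set.ofList lost) (PySem.Set.ofList reserve) with hS0
  set L := PySem.List.sorted S0 (fun x => x) false with hLdef
  set R := PySem.List.sorted (PySem.Set.diff (PySem.Set.ofList reserve) (PySem.Set.ofList lost)) (fun x => x) false with hRdef
  have hperm : L.Perm S0 := PySem.List.sorted_perm _ _ _
  have hfold := foldl_solStep_perm hperm.symm R
  rw [hfold.length_eq]
  have hL : L.Pairwise (· < ·) := sorted_diff_pairwise_lt lost reserve
  have hR : R.Pairwise (· < ·) := sorted_diff_pairwise_lt reserve lost
  have hd : ∀ x ∈ L, x ∉ R := by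
    intro x hxL hxR
    have hx0 : x ∈ S0 := hperm.mem_iff.mp hxL
    have hxr : x ∈ PySem.Set.diff (PySem.Set.ofList reserve) (PySem.Set.ofList lost) :=
      (PySem.List.sorted_perm _ _ _).mem_iff.mp hxR
    simp only [hS0, PySem.Set.diff, List.mem_filter, Bool.not_eq_eq_eq_not, Bool.not_true] at hx0 hxr
    have h2 := hxr.2
    simp at h2
    exact h2 ((PySem.List.mem_dedup lost x).mp hx0.1)
  rw [key (L.length + R.length) L R le_rfl hL hR hd]

-- ===== VERDICT (by name: the statement is the Claim_ definition above) =====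
theorem solution_spec : Claim_equal_solution := by
  intro n lost reserve _
  unfold Spec_solution
  exact main_eq n lost reserve
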